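-- pv_equiv track=rewrite | github.com/jcmgray/cotengra | cotengra/utils.py | find_output_from_inputs
-- ===== SOURCE A (Python) =====
-- def find_output_from_inputs(inputs):
--     """Find the output indices for a given set of inputs. The outputs are
--     calculated as the set of indices that appear only once, in the order they
--     appear in the inputs. This is different to `einsum` where they in sorted
--     order since we only require the indices to be hashable.
--
--     Parameters
--     ----------
--     inputs : Sequence[Sequence[Hashable]]
--         The input terms.
--
--     Returns
--     -------
--     output : tuple[Hashable]
--     """
--     # need to compute output
--     appeared = set()
--     once = {}
--     for term in inputs:
--         for ind in term:
--             if ind in appeared: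
--                 # appeared more than once
--                 once.pop(ind, None)
--             else:
--                 # first appearance
--                 once[ind] = None
--                 appeared.add(ind)
--
--     # dict insertion order is same as appearance order
--     return tuple(once)
-- ===== SOURCE B (Python) =====
-- def find_output_from_inputs(inputs):
--     """Tally every index in one pass (counts dict + first-appearance order
--     list), then keep those counted exactly once."""
--     counts = {}
--     order = []
--     for term in inputs:
--         for ind in term:
--             if ind in counts:
--                 counts[ind] += 1
--             else:
--                 counts[ind] = 1
--                 order.append(ind)
--     return tuple(ind for ind in order if counts[ind] == 1)
-- ===== Notes on version B (the rewrite author's own statement) =====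
-- stated objective: alternative
-- what changed: Replaces A's incremental add/pop-when-repeated dict maintenance with a single-pass tally (counts dict plus first-appearance order list) followed by a final filter of once-only indices.
import Mathlib
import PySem

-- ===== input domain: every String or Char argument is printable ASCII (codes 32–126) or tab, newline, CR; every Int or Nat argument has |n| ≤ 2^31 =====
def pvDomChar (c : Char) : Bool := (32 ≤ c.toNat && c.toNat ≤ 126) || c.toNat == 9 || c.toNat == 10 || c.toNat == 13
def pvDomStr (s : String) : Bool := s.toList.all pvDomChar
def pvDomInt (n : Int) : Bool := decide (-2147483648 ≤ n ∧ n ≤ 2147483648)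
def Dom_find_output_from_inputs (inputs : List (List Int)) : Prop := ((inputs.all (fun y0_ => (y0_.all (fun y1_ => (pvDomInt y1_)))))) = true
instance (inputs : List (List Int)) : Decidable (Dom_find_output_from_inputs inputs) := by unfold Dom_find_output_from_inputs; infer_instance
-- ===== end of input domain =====

-- B replaces A's add/pop-when-repeated dict maintenance by a one-pass tally (counts + first-appearance order) and a final filter; alternative decomposition, same cost.


-- ===== PORT A =====
-- state: (appeared : PySem.Set Int, once : PySem.Dict Int Unit); Python's `once[ind] = None` stores a unit value
def find_output_from_inputs (inputs : List (List Int)) : List Int :=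
  let st := inputs.foldl
    (fun st term => term.foldl
      (fun st ind =>
        if PySem.Set.contains st.1 ind then
          (st.1, st.2.erase ind)          -- once.pop(ind, None)
        else
          (PySem.Set.add st.1 ind, st.2.insert ind ()))
      st)
    ((PySem.Set.empty : PySem.Set Int), (PySem.Dict.empty : PySem.Dict Int Unit))
  st.2.keys                               -- tuple(once)

-- ===== PORT B =====
-- state: (counts : PySem.Dict Int Int, order : List Int)
def find_output_from_inputs_alt (inputs : List (List Int)) : List Int :=
  let st := inputs.foldl
    (fun st term => term.foldl
      (fun st ind =>
        if st.1.contains ind then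
          (st.1.insert ind (st.1.getD ind 0 + 1), st.2)   -- counts[ind] += 1
        else
          (st.1.insert ind 1, st.2 ++ [ind]))             -- counts[ind] = 1; order.append(ind)
      st)
    ((PySem.Dict.empty : PySem.Dict Int Int), ([] : List Int))
  -- every ind in order is a key of counts, so counts[ind] is getD with any default
  st.2.filter (fun ind => st.1.getD ind 0 == 1)

-- ===== PRECONDITION & SPEC =====
def Spec_find_output_from_inputs (inputs : List (List Int)) (out : List Int) : Prop := out = find_output_from_inputs_alt inputs
instance (inputs : List (List Int)) (out : List Int) : Decidable (Spec_find_output_from_inputs inputs out) := by unfold Spec_find_output_from_inputs; infer_instance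

-- ===== CLAIM (what is proved, stated in full; the proofs are below) =====
def Claim_equal_find_output_from_inputs : Prop := ∀ (inputs : List (List Int)), Dom_find_output_from_inputs inputs → Spec_find_output_from_inputs inputs (find_output_from_inputs inputs)

-- ===== LEMMAS AND PROOFS =====

-- the common value both programs compute on the flattened index stream
def pvOnceSpec (ys : List Int) : List Int :=
  (PySem.List.dedup ys).filter (fun i => ys.count i == 1)

def pvStepA (st : PySem.Set Int × PySem.Dict Int Unit) (ind : Int) : PySem.Set Int × PySem.Dict Int Unit :=
  if PySem.Set.contains st.1 ind then (st.1, st.2.erase ind)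
  else (PySem.Set.add st.1 ind, st.2.insert ind ())

def pvStepB (st : PySem.Dict Int Int × List Int) (ind : Int) : PySem.Dict Int Int × List Int :=
  if st.1.contains ind then (st.1.insert ind (st.1.getD ind 0 + 1), st.2)
  else (st.1.insert ind 1, st.2 ++ [ind])

lemma pv_keys_erase (d : PySem.Dict Int Unit) (k : Int) :
    (d.erase k).keys = d.keys.filter (fun a => !(a == k)) := by
  show (List.filter _ d.items).map _ = _
  rw [PySem.Dict.keys, List.filter_map]
  rfl

lemma pvStepA_pos (st : PySem.Set Int × PySem.Dict Int Unit) (x : Int)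
    (h : PySem.Set.contains st.1 x = true) : pvStepA st x = (st.1, st.2.erase x) := by
  have hm : x ∈ st.1 := by simpa [PySem.Set.contains] using h
  simp [pvStepA, PySem.Set.contains, hm]

lemma pvStepA_neg (st : PySem.Set Int × PySem.Dict Int Unit) (x : Int)
    (h : PySem.Set.contains st.1 x = false) :
    pvStepA st x = (PySem.Set.add st.1 x, st.2.insert x ()) := by
  have hm : x ∉ st.1 := by simpa [PySem.Set.contains] using h
  simp [pvStepA, PySem.Set.contains, hm]

lemma pvA_inv (ys : List Int) :
    (ys.foldl pvStepA (PySem.Set.empty, PySem.Dict.empty)).1 = PySem.Set.ofList ys ∧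
    (ys.foldl pvStepA (PySem.Set.empty, PySem.Dict.empty)).2.keys = pvOnceSpec ys := by
  induction ys using List.reverseRecOn with
  | nil => constructor <;> rfl
  | append_singleton p x ih =>
    obtain ⟨h1, h2⟩ := ih
    rw [List.foldl_append, List.foldl_cons, List.foldl_nil]
    have hsa : PySem.Set.ofList (p ++ [x]) = PySem.Set.add (PySem.Set.ofList p) x := by
      rw [PySem.Set.ofList_append]; rfl
    by_cases hx : x ∈ p
    · have hxs : x ∈ PySem.Set.ofList p := (PySem.Set.mem_ofList p x).mpr hx
      have hc : PySem.Set.contains (p.foldl pvStepA (PySem.Set.empty, PySem.Dict.empty)).1 x = true := by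
        rw [h1]; simp [PySem.Set.contains, hxs]
      rw [pvStepA_pos _ _ hc]
      constructor
      · rw [h1, hsa]
        simp [PySem.Set.add, PySem.Set.contains, hxs]
      · rw [pv_keys_erase, h2]
        unfold pvOnceSpec
        have hded : PySem.List.dedup (p ++ [x]) = PySem.List.dedup p := by
          unfold PySem.List.dedup
          simp [hsa, PySem.Set.add, PySem.Set.contains, hxs]
        rw [hded, List.filter_filter]
        apply List.filter_congr
        intro i hi
        by_cases hix : i = x
        · subst hix
          have : 1 ≤ p.count i := List.one_le_count_iff.mpr hx
          simp [List.count_append]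
          omega
        · simp [List.count_append, hix, Ne.symm hix, beq_iff_eq]
    · have hxs : x ∉ PySem.Set.ofList p := fun h => hx ((PySem.Set.mem_ofList p x).mp h)
      have hknd : x ∉ (p.foldl pvStepA (PySem.Set.empty, PySem.Dict.empty)).2.keys := by
        rw [h2]
        intro hmem
        have := List.mem_of_mem_filter hmem
        exact hx ((PySem.Set.mem_ofList p x).mp ((PySem.List.dedup_eq_ofList p) ▸ this))
      have hc : PySem.Set.contains (p.foldl pvStepA (PySem.Set.empty, PySem.Dict.empty)).1 x = false := by
        rw [h1]; simp [PySem.Set.contains, hxs]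
      rw [pvStepA_neg _ _ hc]
      constructor
      · rw [h1, hsa]
      · rw [PySem.Dict.keys_insert_of_not_contains, h2]
        · unfold pvOnceSpec
          have hded : PySem.List.dedup (p ++ [x]) = PySem.List.dedup p ++ [x] := by
            unfold PySem.List.dedup
            simp [hsa, PySem.Set.add, PySem.Set.contains, hxs]
          rw [hded, List.filter_append]
          congr 1
          · apply List.filter_congr
            intro i hi
            have hip : i ∈ p := (PySem.Set.mem_ofList p i).mp ((PySem.List.dedup_eq_ofList p) ▸ hi)
            have hix : i ≠ x := fun h => hx (h ▸ hip)
            simp [List.count_append, Ne.symm hix]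
          · have : p.count x = 0 := List.count_eq_zero.mpr hx
            simp [List.count_append, List.count_singleton, this]
        · rw [PySem.Dict.contains_eq_decide_mem_keys]
          simpa using hknd

lemma pvB_inv (ys : List Int) (d : PySem.Dict Int Int) (s : List Int)
    (h : ∀ x, d.contains x = true ↔ x ∈ s) :
    (ys.foldl pvStepB (d, s)).1 = ys.foldl (fun d x => d.insert x (d.getD x 0 + 1)) d ∧
    (ys.foldl pvStepB (d, s)).2 = PySem.Set.update s ys := by
  induction ys generalizing d s with
  | nil => constructor <;> rfl
  | cons x ys ih =>
    rw [List.foldl_cons, List.foldl_cons]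
    by_cases hx : x ∈ s
    · have hc : d.contains x = true := (h x).mpr hx
      have hstep : pvStepB (d, s) x = (d.insert x (d.getD x 0 + 1), s) := by
        simp [pvStepB, hc]
      rw [hstep]
      have h' : ∀ y, (d.insert x (d.getD x 0 + 1)).contains y = true ↔ y ∈ s := by
        intro y
        rw [PySem.Dict.contains_insert]
        constructor
        · intro hy
          rcases Bool.or_eq_true_iff.mp hy with hy | hy
          · exact (eq_of_beq hy) ▸ hx
          · exact (h y).mp hy
        · intro hy
          exact Bool.or_eq_true_iff.mpr (Or.inr ((h y).mpr hy))
      obtain ⟨i1, i2⟩ := ih _ _ h'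
      refine ⟨i1, ?_⟩
      rw [i2]
      show PySem.Set.update s ys = PySem.Set.update s (x :: ys)
      unfold PySem.Set.update
      rw [List.foldl_cons]
      have : PySem.Set.add s x = s := by
        simp [PySem.Set.add, PySem.Set.contains, hx]
      rw [this]
    · have hc : d.contains x = false := by
        rw [Bool.eq_false_iff]; intro hcon; exact hx ((h x).mp hcon)
      have hstep : pvStepB (d, s) x = (d.insert x 1, s ++ [x]) := by
        simp [pvStepB, hc]
      rw [hstep]
      have h' : ∀ y, (d.insert x 1).contains y = true ↔ y ∈ s ++ [x] := by
        intro y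
        rw [PySem.Dict.contains_insert]
        simp only [List.mem_append, List.mem_singleton]
        constructor
        · intro hy
          rcases Bool.or_eq_true_iff.mp hy with hy | hy
          · exact Or.inr (eq_of_beq hy)
          · exact Or.inl ((h y).mp hy)
        · rintro (hy | hy)
          · exact Bool.or_eq_true_iff.mpr (Or.inr ((h y).mpr hy))
          · exact Bool.or_eq_true_iff.mpr (Or.inl (beq_iff_eq.mpr hy))
      obtain ⟨i1, i2⟩ := ih _ _ h'
      constructor
      · rw [i1]
        have : d.insert x 1 = d.insert x (d.getD x 0 + 1) := by
          rw [PySem.Dict.getD_of_not_contains d 0 hc]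
          norm_num
        rw [this]
      · rw [i2]
        show PySem.Set.update (s ++ [x]) ys = PySem.Set.update s (x :: ys)
        unfold PySem.Set.update
        rw [List.foldl_cons]
        have : PySem.Set.add s x = s ++ [x] := by
          simp [PySem.Set.add, PySem.Set.contains, hx]
        rw [this]

lemma pvB_eq_spec (ys : List Int) :
    (ys.foldl pvStepB (PySem.Dict.empty, ([] : List Int))).2.filter
      (fun ind => (ys.foldl pvStepB (PySem.Dict.empty, ([] : List Int))).1.getD ind 0 == 1)
      = pvOnceSpec ys := by
  obtain ⟨h1, h2⟩ := pvB_inv ys PySem.Dict.empty []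
    (by intro x; simp [PySem.Dict.contains_empty])
  rw [h1, h2, PySem.Dict.foldl_insert_getD_add_one_eq_counter]
  unfold pvOnceSpec
  have hord : PySem.Set.update ([] : List Int) ys = PySem.List.dedup ys := by
    rw [PySem.List.dedup_eq_ofList]; rfl
  rw [hord]
  apply List.filter_congr
  intro i _
  rw [PySem.Dict.getD_counter]
  simp [Nat.cast_eq_one]

-- ===== VERDICT (by name: the statement is the Claim_ definition above) =====
theorem find_output_from_inputs_spec : Claim_equal_find_output_from_inputs := by
  intro inputs _
  show (inputs.foldl (fun st term => term.foldl pvStepA st)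
          ((PySem.Set.empty : PySem.Set Int), (PySem.Dict.empty : PySem.Dict Int Unit))).2.keys
      = ((inputs.foldl (fun st term => term.foldl pvStepB st)
          ((PySem.Dict.empty : PySem.Dict Int Int), ([] : List Int))).2.filter
          (fun ind => (inputs.foldl (fun st term => term.foldl pvStepB st)
            ((PySem.Dict.empty : PySem.Dict Int Int), ([] : List Int))).1.getD ind 0 == 1))
  rw [← List.foldl_flatten (f := pvStepA), ← List.foldl_flatten (f := pvStepB)]
  rw [(pvA_inv inputs.flatten).2, pvB_eq_spec inputs.flatten]
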